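-- pv_equiv track=rewrite | github.com/jacekloboda/ASD | graph-algorithms/find-cliques.py | clique
-- ===== SOURCE A (Python) =====
-- def bipartite(G):  # returns list of colors for every node in G
--
--     from collections import deque
--
--     n = len(G)
--     # color of every node (1 or -1), 0 if not visited yet
--     C = [0 for _ in range(n)]
--     q = deque()
--     q.append(0)
--     C[0] = 1
--
--     while q:
--
--         u = q.popleft()
--
--         for v in G[u]:
--
--             if not C[v]:
--
--                 C[v] = -(C[u])
--                 q.append(v)
--
--     return C
--
-- def completion(G):  # returns neighborhood list for completion of G
--
--     n = len(G)
--     C = [[] for _ in range(n)]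
--
--     for u in range(n):
--
--         for v in range(n):
--
--             flag = False  # true if v is neighbor of u in G, false if not
--
--             for neighbor in G[u]:
--
--                 if neighbor == v:
--                     flag = True
--
--             if not flag:
--
--                 C[u].append(v)
--
--     return C
--
-- def clique(G):  # divides G to two cliques
--
--     n = len(G)
--     Comp = completion(G)
--     Col = bipartite(Comp)
--
--     Clique1 = []
--     Clique2 = []
--
--     for u in range(n):
--
--         if Col[u] == 0:
--
--             Clique1.append(u)
--             Clique2.append(u)
--
--         else:
--             Clique1.append(u) if Col[u] == 1 else Clique2.append(u)
--
--     return Clique1, Clique2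
--
-- G = [[1, 2, 3],
--      [0, 2, 3],
--      [0, 1, 3],
--      [0, 1, 2, 4, 5],
--      [3, 5],
--      [3, 4]
--      ]
-- ===== SOURCE B (Python) =====
-- def clique(G):  # divides G to two cliques
--     n = len(G)
--     # complement-BFS distances from node 0, computed level by level
--     # (no completion table, no queue, no colors)
--     dist = [-1] * n
--     dist[0] = 0
--     front = [0]
--     d = 0
--     while front:
--         d += 1
--         nxt = []
--         for u in front:
--             nb = set(G[u])
--             for v in range(n):
--                 if v not in nb and dist[v] < 0:
--                     dist[v] = d
--                     nxt.append(v)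
--         front = nxt
--     Clique1 = [u for u in range(n) if dist[u] < 0 or dist[u] % 2 == 0]
--     Clique2 = [u for u in range(n) if dist[u] < 0 or dist[u] % 2 == 1]
--     return Clique1, Clique2
-- ===== Notes on version B (the rewrite author's own statement) =====
-- stated objective: faster
-- what changed: B never builds A's complement adjacency table and never propagates +/-1 colors through a FIFO queue: it computes complement-BFS shortest distances from node 0 level-synchronously (frontier list, lazy set-membership complement test) and partitions nodes by distance parity (unreached nodes, distance -1, going to both cliques), which coincides with A's color split because A's queue BFS colors each node by the parity of its BFS level.
import Mathlib
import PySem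

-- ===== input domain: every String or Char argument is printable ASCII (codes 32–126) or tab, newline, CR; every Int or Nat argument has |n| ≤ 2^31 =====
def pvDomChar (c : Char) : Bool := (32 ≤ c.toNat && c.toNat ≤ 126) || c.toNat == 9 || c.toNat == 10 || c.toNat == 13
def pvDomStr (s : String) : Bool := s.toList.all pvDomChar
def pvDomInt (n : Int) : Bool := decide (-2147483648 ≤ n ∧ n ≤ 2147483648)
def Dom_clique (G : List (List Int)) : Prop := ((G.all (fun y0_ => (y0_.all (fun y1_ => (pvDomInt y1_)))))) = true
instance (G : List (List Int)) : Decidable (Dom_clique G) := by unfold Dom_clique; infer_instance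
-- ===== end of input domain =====

-- B replaces A's completion-table + color-propagating queue BFS by a level-synchronous computation
-- of complement-BFS distances (frontier lists, lazy set-membership complement test) and splits nodes
-- by distance parity (measured faster; no complement adjacency table is built).

-- ===== PORT A =====
-- port of `completion`: neighborhood lists of the complement of G
def completionA (G : List (List Int)) : List (List Int) :=
  let n : Int := PySem.List.len G
  let C0 : List (List Int) := (PySem.List.pyRange 0 n 1).map (fun _ => [])
  (PySem.List.pyRange 0 n 1).foldl (fun C u =>
    (PySem.List.pyRange 0 n 1).foldl (fun C v =>
      let flag := (PySem.List.pyGetD G u []).foldl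
        (fun flag neighbor => if neighbor == v then true else flag) false
      if !flag then PySem.List.pySetD C u (PySem.List.pyGetD C u [] ++ [v]) else C) C) C0

-- the `while q:` loop of `bipartite`; fuel G.length + 1 suffices: each node is enqueued at most once
def bfsLoopA : Nat → List (List Int) → List Int → List Int → List Int
  | 0, _, _, C => C
  | _ + 1, _, [], C => C
  | fuel + 1, Gc, u :: q, C =>
    let s := (PySem.List.pyGetD Gc u []).foldl (fun (qc : List Int × List Int) v =>
      if PySem.List.pyGetD qc.2 v 0 == 0 then
        (qc.1 ++ [v], PySem.List.pySetD qc.2 v (-(PySem.List.pyGetD qc.2 u 0)))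
      else qc) (q, C)
    bfsLoopA fuel Gc s.1 s.2

def bipartiteA (Gc : List (List Int)) : List Int :=
  let n : Int := PySem.List.len Gc
  let C : List Int := (PySem.List.pyRange 0 n 1).map (fun _ => 0)
  bfsLoopA (Gc.length + 1) Gc [0] (PySem.List.pySetD C 0 1)

def clique (G : List (List Int)) : List Int × List Int :=
  let n : Int := PySem.List.len G
  let Col := bipartiteA (completionA G)
  (PySem.List.pyRange 0 n 1).foldl (fun (cs : List Int × List Int) u =>
    if PySem.List.pyGetD Col u 0 == 0 then (cs.1 ++ [u], cs.2 ++ [u])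
    else if PySem.List.pyGetD Col u 0 == 1 then (cs.1 ++ [u], cs.2)
    else (cs.1, cs.2 ++ [u])) ([], [])

-- ===== PORT B =====
-- Source B's `while front:` loop: one recursive call per BFS level, dist holds -1 (unreached) or the level number;
-- fuel G.length + 1 suffices: each nonempty next frontier assigns at least one -1 entry
def bfsLevelB : Nat → List (List Int) → Int → List Int → Int → List Int → List Int
  | 0, _, _, _, _, dist => dist
  | _ + 1, _, _, [], _, dist => dist
  | fuel + 1, G, n, u :: fr, d, dist =>
    let d1 := d + 1
    let s := (u :: fr).foldl (fun (s : List Int × List Int) u =>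
      let nb : PySem.Set Int := PySem.Set.ofList (PySem.List.pyGetD G u [])
      (PySem.List.pyRange 0 n 1).foldl (fun (s2 : List Int × List Int) v =>
        if !(nb.contains v) && decide (PySem.List.pyGetD s2.2 v 0 < 0) then
          (s2.1 ++ [v], PySem.List.pySetD s2.2 v d1)
        else s2) s) ([], dist)
    bfsLevelB fuel G n s.1 d1 s.2

def clique_alt (G : List (List Int)) : List Int × List Int :=
  let n : Int := PySem.List.len G
  let dist0 : List Int := PySem.List.pySetD ((PySem.List.pyRange 0 n 1).map (fun _ => (-1 : Int))) 0 0
  let dist := bfsLevelB (G.length + 1) G n [0] 0 dist0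
  ((PySem.List.pyRange 0 n 1).filter (fun u =>
      decide (PySem.List.pyGetD dist u 0 < 0) || (PySem.Int.mod (PySem.List.pyGetD dist u 0) 2 == 0)),
   (PySem.List.pyRange 0 n 1).filter (fun u =>
      decide (PySem.List.pyGetD dist u 0 < 0) || (PySem.Int.mod (PySem.List.pyGetD dist u 0) 2 == 1)))

-- ===== PRECONDITION & SPEC =====
-- A raises IndexError on G = [] (the assignment C[0] = 1 in `bipartite`); everywhere else it returns.
def Pre_clique (G : List (List Int)) : Prop := G ≠ []
instance (G : List (List Int)) : Decidable (Pre_clique G) := by unfold Pre_clique; infer_instance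
def pvWitness_clique : List (List Int) := [[1], [0]]

def Spec_clique (G : List (List Int)) (out : List Int × List Int) : Prop := out = clique_alt G
instance (G : List (List Int)) (out : List Int × List Int) : Decidable (Spec_clique G out) := by unfold Spec_clique; infer_instance

-- ===== CLAIM (what is proved, stated in full; the proofs are below) =====
def Claim_equal_clique : Prop := ∀ (G : List (List Int)), Dom_clique G → Pre_clique G → Spec_clique G (clique G)

-- ===== LEMMAS AND PROOFS =====

-- row u of the complement graph, as A's `completion` builds it
def pvFrow (G : List (List Int)) (u : Int) : List Int :=
  (PySem.List.pyRange 0 (PySem.List.len G) 1).filter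
    (fun v => !((PySem.List.pyGetD G u []).contains v))

-- A's color of a node that B records at distance e (-1 = unreached)
def pvPc (e : Int) : Int := if e < 0 then 0 else if PySem.Int.mod e 2 == 0 then 1 else -1

-- number of unreached (-1) entries still left in dist
def pvNeg (l : List Int) : Nat := (l.filter (fun e => decide (e < 0))).length

-- A's BFS body per complement-neighbor v (as it appears in bfsLoopA)
def pvNA (u : Int) (qc : List Int × List Int) (v : Int) : List Int × List Int :=
  if PySem.List.pyGetD qc.2 v 0 == 0 then
    (qc.1 ++ [v], PySem.List.pySetD qc.2 v (-(PySem.List.pyGetD qc.2 u 0)))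
  else qc

-- the same body iterated over the full range, guarded by non-adjacency
def pvNAg (row : List Int) (u : Int) (s : List Int × List Int) (v : Int) : List Int × List Int :=
  if !(row.contains v) then pvNA u s v else s

-- B's inner body per candidate v
def pvNB (row : List Int) (d1 : Int) (s : List Int × List Int) (v : Int) : List Int × List Int :=
  if !((PySem.Set.ofList row).contains v) && decide (PySem.List.pyGetD s.2 v 0 < 0) then
    (s.1 ++ [v], PySem.List.pySetD s.2 v d1)
  else s

-- per-popped-node processing in A (queue version) and per-frontier-node in B
def pvLA (Gc : List (List Int)) (s : List Int × List Int) (u : Int) : List Int × List Int :=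
  (PySem.List.pyGetD Gc u []).foldl (pvNA u) s

def pvLB (G : List (List Int)) (n d1 : Int) (s : List Int × List Int) (u : Int) : List Int × List Int :=
  (PySem.List.pyRange 0 n 1).foldl (pvNB (PySem.List.pyGetD G u []) d1) s

-- A's inner `flag` loop is a membership test
lemma pvFlag_eq (row : List Int) (v : Int) (b : Bool) :
    row.foldl (fun flag neighbor => if neighbor == v then true else flag) b
      = (b || row.contains v) := by
  induction row generalizing b with
  | nil => simp
  | cons a t ih =>
    simp only [List.foldl_cons]
    rw [ih]
    by_cases h : a = v
    · subst h; simp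
    · have h' : ¬ v = a := fun hh => h hh.symm
      simp [h, h']

-- setting one entry of a map over a range updates the mapped function
lemma pvSet_map_pyRange {β : Type} (f : Int → β) (n : Int) (k : Nat) (v : β) :
    ((PySem.List.pyRange 0 n 1).map f).set k v
      = (PySem.List.pyRange 0 n 1).map (fun u => if u = (k : Int) then v else f u) := by
  apply List.ext_getElem (by simp)
  intro i h1 h2
  simp only [List.getElem_set, List.getElem_map, PySem.List.getElem_pyRange_one]
  split_ifs with h h' h' <;> first | rfl | (exfalso; omega)

lemma pvInner (G : List (List Int)) (u : Int) (hu : 0 ≤ u) (hun : u < PySem.List.len G)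
    (vs : List Int) (f : Int → List Int) :
    vs.foldl (fun C v =>
        if !((PySem.List.pyGetD G u []).contains v)
        then PySem.List.pySetD C u (PySem.List.pyGetD C u [] ++ [v]) else C)
      ((PySem.List.pyRange 0 (PySem.List.len G) 1).map f)
    = (PySem.List.pyRange 0 (PySem.List.len G) 1).map
        (fun w => if w = u then
            f u ++ vs.filter (fun v => !((PySem.List.pyGetD G u []).contains v))
          else f w) := by
  induction vs generalizing f with
  | nil =>
    simp only [List.foldl_nil, List.filter_nil, List.append_nil]
    refine (List.map_congr_left fun w _ => ?_).symm
    by_cases h : w = u <;> simp [h]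
  | cons v vs ih =>
    simp only [List.foldl_cons, List.filter_cons]
    by_cases hcv : v ∈ PySem.List.pyGetD G u []
    · rw [if_neg (by simp [hcv]), ih f]
      simp [hcv]
    · rw [if_pos (by simp [hcv]),
        PySem.List.pyGetD_map_pyRange_of_nonneg f _ u [] hu hun,
        PySem.List.pySetD_of_nonneg _ _ hu,
        pvSet_map_pyRange f _ u.toNat (f u ++ [v])]
      have htn : ((u.toNat : Int)) = u := Int.toNat_of_nonneg hu
      rw [show (fun w => if w = ((u.toNat : Nat) : Int) then f u ++ [v] else f w)
            = (fun w => if w = u then f u ++ [v] else f w) by rw [htn]]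
      rw [ih (fun w => if w = u then f u ++ [v] else f w)]
      refine List.map_congr_left fun w _ => ?_
      by_cases h : w = u <;> simp [h, hcv, List.append_assoc]

lemma pvCompletion_aux (G : List (List Int)) (m : Nat) (hm : m ≤ G.length) :
    (PySem.List.pyRange 0 (m : Int) 1).foldl (fun C u =>
      (PySem.List.pyRange 0 (PySem.List.len G) 1).foldl (fun C v =>
        if !((PySem.List.pyGetD G u []).contains v)
        then PySem.List.pySetD C u (PySem.List.pyGetD C u [] ++ [v]) else C) C)
      ((PySem.List.pyRange 0 (PySem.List.len G) 1).map (fun _ => []))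
    = (PySem.List.pyRange 0 (PySem.List.len G) 1).map
        (fun u => if u < (m : Int) then pvFrow G u else []) := by
  induction m with
  | zero =>
    rw [show ((0 : Nat) : Int) = 0 by norm_num, PySem.List.pyRange_one_eq_nil le_rfl]
    simp only [List.foldl_nil]
    refine List.map_congr_left fun w hw => ?_
    have hb := PySem.List.mem_pyRange_one.mp hw
    rw [if_neg (by omega)]
  | succ m ih =>
    have hm' : m ≤ G.length := le_trans (Nat.le_succ m) hm
    rw [show ((m + 1 : Nat) : Int) = (m : Int) + 1 by push_cast; ring,
        PySem.List.pyRange_one_succ_right (Int.natCast_nonneg m),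
        List.foldl_append, ih hm', List.foldl_cons, List.foldl_nil]
    have hun : (m : Int) < PySem.List.len G := by
      rw [PySem.List.len_eq]; exact_mod_cast hm
    rw [pvInner G (m : Int) (Int.natCast_nonneg m) hun]
    refine List.map_congr_left fun w hw => ?_
    have hb := PySem.List.mem_pyRange_one.mp hw
    by_cases h : w = (m : Int)
    · subst h
      rw [if_pos rfl, if_neg (show ¬ ((m : Int) < (m : Int)) by omega),
        if_pos (show (m : Int) < (m : Int) + 1 by omega), List.nil_append]
      rfl
    · rw [if_neg h]
      by_cases h2 : w < (m : Int)
      · rw [if_pos h2, if_pos (by omega)]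
      · rw [if_neg h2, if_neg (by omega)]

lemma pvCompletion_eq (G : List (List Int)) :
    completionA G
      = (PySem.List.pyRange 0 (PySem.List.len G) 1).map (fun u => pvFrow G u) := by
  unfold completionA
  simp only [pvFlag_eq, Bool.false_or]
  have h0 : PySem.List.len G = ((G.length : Nat) : Int) := PySem.List.len_eq G
  have := pvCompletion_aux G G.length le_rfl
  rw [← h0] at this
  rw [this]
  refine List.map_congr_left fun u hu => ?_
  have hb := PySem.List.mem_pyRange_one.mp hu
  rw [if_pos (by rw [h0] at hb; exact_mod_cast hb.2)]

-- small bridges -------------------------------------------------------------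

lemma pvContains (row : List Int) (v : Int) :
    (PySem.Set.ofList row).contains v = row.contains v := by
  have h1 : ((PySem.Set.ofList row).contains v = true) ↔ (row.contains v = true) := by
    rw [PySem.Set.contains_eq_listContains]
    simp only [List.contains_iff_mem]
    exact PySem.Set.mem_ofList row v
  by_cases h : row.contains v = true
  · rw [h, h1.mpr h]
  · rw [Bool.not_eq_true] at h
    rw [h]
    by_contra hc
    rw [Bool.not_eq_false] at hc
    rw [h1.mp hc] at h
    exact Bool.false_ne_true h.symm

lemma pvGetMap (l : List Int) (i : Int) (h0 : 0 ≤ i) (h1 : i < (l.length : Int)) :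
    PySem.List.pyGetD (l.map pvPc) i 0 = pvPc (PySem.List.pyGetD l i 0) := by
  rw [PySem.List.pyGetD_eq_getElem _ 0 h0 (by simpa using h1),
      PySem.List.pyGetD_eq_getElem _ 0 h0 h1, List.getElem_map]

lemma pvSetMap (l : List Int) (i x : Int) (h0 : 0 ≤ i) :
    PySem.List.pySetD (l.map pvPc) i (pvPc x) = (PySem.List.pySetD l i x).map pvPc := by
  rw [PySem.List.pySetD_of_nonneg _ _ h0, PySem.List.pySetD_of_nonneg _ _ h0, List.map_set]

lemma pvGetSet (xs : List Int) (i j x d : Int) (h0 : 0 ≤ i) (h1 : i < (xs.length : Int))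
    (hj : 0 ≤ j) :
    PySem.List.pyGetD (PySem.List.pySetD xs i x) j d
      = if j = i then x else PySem.List.pyGetD xs j d := by
  have hi : i = ((i.toNat : Nat) : Int) := (Int.toNat_of_nonneg h0).symm
  have hjn : j = ((j.toNat : Nat) : Int) := (Int.toNat_of_nonneg hj).symm
  rw [hi, hjn, PySem.List.pyGetD_pySetD_natCast xs i.toNat j.toNat x d (by omega)]
  by_cases h : j.toNat = i.toNat
  · rw [if_pos h, if_pos (by omega)]
  · rw [if_neg h, if_neg (by omega)]

lemma pvNegSetNat (x : Int) (hx : 0 ≤ x) :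
    ∀ (l : List Int) (k : Nat) (hk : k < l.length), l[k] < 0 →
      pvNeg (l.set k x) + 1 = pvNeg l := by
  intro l
  induction l with
  | nil => intro k hk; simp at hk
  | cons a t ih =>
    intro k hk hneg
    cases k with
    | zero =>
      simp only [List.getElem_cons_zero] at hneg
      unfold pvNeg
      simp [hneg, show ¬ x < 0 by omega]
    | succ k =>
      simp only [List.getElem_cons_succ] at hneg
      have := ih k (by simpa using hk) hneg
      unfold pvNeg at this ⊢
      simp only [List.set_cons_succ, List.filter_cons]
      by_cases ha : (decide (a < 0)) = true <;> simp only [ha] <;> simp <;> omega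

lemma pvNegSet (l : List Int) (i x : Int) (h0 : 0 ≤ i) (h1 : i < (l.length : Int))
    (hneg : PySem.List.pyGetD l i 0 < 0) (hx : 0 ≤ x) :
    pvNeg (PySem.List.pySetD l i x) + 1 = pvNeg l := by
  rw [PySem.List.pySetD_of_nonneg _ _ h0]
  rw [PySem.List.pyGetD_eq_getElem _ 0 h0 h1] at hneg
  exact pvNegSetNat x hx l i.toNat (by omega) hneg

-- pvPc facts ---------------------------------------------------------------

lemma pvPc_eq_zero_iff (e : Int) : pvPc e = 0 ↔ e < 0 := by
  unfold pvPc
  split_ifs with h1 h2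
  · simp [h1]
  · constructor <;> intro h <;> [exact absurd h one_ne_zero; exact absurd h h1]
  · constructor <;> intro h <;> [exact absurd h (by norm_num); exact absurd h h1]

lemma pvMod2 (e : Int) (_he : 0 ≤ e) : PySem.Int.mod e 2 = e % 2 :=
  PySem.Int.mod_eq_emod_of_pos (by norm_num)

lemma pvPc_succ (d : Int) (hd : 0 ≤ d) : pvPc (d + 1) = -(pvPc d) := by
  unfold pvPc
  rw [pvMod2 d hd, pvMod2 (d + 1) (by omega),
      if_neg (show ¬ (d + 1 < 0) by omega), if_neg (show ¬ (d < 0) by omega)]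
  by_cases h2 : d % 2 = 0
  · rw [if_neg (show ¬ (((d + 1) % 2 == 0) = true) by simp; omega), if_pos (by simp [h2])]
  · rw [if_pos (show ((d + 1) % 2 == 0) = true by simp; omega), if_neg (by simp [h2]), neg_neg]

lemma pvPred1 (e : Int) :
    ((pvPc e == 0) || (pvPc e == 1))
      = (decide (e < 0) || (PySem.Int.mod e 2 == 0)) := by
  unfold pvPc
  by_cases h : e < 0
  · simp [h]
  · rw [if_neg h, pvMod2 e (by omega)]
    by_cases h2 : e % 2 = 0 <;> simp [h2, h]

lemma pvPred2 (e : Int) :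
    ((pvPc e == 0) || !(pvPc e == 1))
      = (decide (e < 0) || (PySem.Int.mod e 2 == 1)) := by
  unfold pvPc
  by_cases h : e < 0
  · simp [h]
  · rw [if_neg h, pvMod2 e (by omega)]
    have : 0 ≤ e % 2 ∧ e % 2 < 2 := ⟨Int.emod_nonneg e (by norm_num), Int.emod_lt_of_pos e (by norm_num)⟩
    by_cases h2 : e % 2 = 0
    · simp [h2, h]
    · have h3 : e % 2 = 1 := by omega
      simp [h3, h]

-- queue/frontier plumbing ---------------------------------------------------

lemma bfsLoopA_nil (f : Nat) (Gc : List (List Int)) (C : List Int) :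
    bfsLoopA f Gc [] C = C := by cases f <;> rfl

lemma bfsLevelB_nil (f : Nat) (G : List (List Int)) (n d : Int) (dist : List Int) :
    bfsLevelB f G n [] d dist = dist := by cases f <;> rfl

lemma bfsLevelB_cons (fuel : Nat) (G : List (List Int)) (n : Int) (u : Int) (fr : List Int)
    (d : Int) (dist : List Int) :
    bfsLevelB (fuel + 1) G n (u :: fr) d dist
      = bfsLevelB fuel G n (((u :: fr).foldl (pvLB G n (d + 1)) ([], dist)).1) (d + 1)
          (((u :: fr).foldl (pvLB G n (d + 1)) ([], dist)).2) := rfl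

-- the node fold only appends to the queue; the appended part and the new colors do not depend on the queue
lemma pvShift (u : Int) (vs : List Int) :
    ∀ (q C : List Int),
      vs.foldl (pvNA u) (q, C)
        = (q ++ (vs.foldl (pvNA u) ([], C)).1, (vs.foldl (pvNA u) ([], C)).2) := by
  induction vs with
  | nil => intro q C; simp
  | cons v vs ih =>
    intro q C
    simp only [List.foldl_cons]
    by_cases h : PySem.List.pyGetD C v 0 == 0
    · rw [show pvNA u (q, C) v
            = (q ++ [v], PySem.List.pySetD C v (-(PySem.List.pyGetD C u 0))) by
          unfold pvNA; rw [if_pos h],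
        show pvNA u (([] : List Int), C) v
            = ([] ++ [v], PySem.List.pySetD C v (-(PySem.List.pyGetD C u 0))) by
          unfold pvNA; rw [if_pos h]]
      rw [ih (q ++ [v]), ih ([] ++ [v])]
      simp
    · rw [show pvNA u (q, C) v = (q, C) by unfold pvNA; rw [if_neg h],
        show pvNA u (([] : List Int), C) v = (([] : List Int), C) by unfold pvNA; rw [if_neg h]]
      exact ih q C

lemma pvShiftLA (Gc : List (List Int)) (u : Int) (q C : List Int) :
    pvLA Gc (q, C) u
      = (q ++ (pvLA Gc ([], C) u).1, (pvLA Gc ([], C) u).2) := pvShift u _ q C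

-- popping a block `front` off the queue = processing it node by node, appending new nodes behind
lemma pvQueue (Gc : List (List Int)) (front : List Int) :
    ∀ (f : Nat) (q C : List Int),
      bfsLoopA (front.length + f) Gc (front ++ q) C
        = bfsLoopA f Gc ((front.foldl (pvLA Gc) (q, C)).1) ((front.foldl (pvLA Gc) (q, C)).2) := by
  induction front with
  | nil => intro f q C; simp
  | cons u fr ih =>
    intro f q C
    have hfe : (u :: fr).length + f = (fr.length + f) + 1 := by simp; omega
    rw [hfe]
    show bfsLoopA ((fr.length + f) + 1) Gc (u :: (fr ++ q)) C = _
    rw [show bfsLoopA ((fr.length + f) + 1) Gc (u :: (fr ++ q)) C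
          = bfsLoopA (fr.length + f) Gc (pvLA Gc (fr ++ q, C) u).1 (pvLA Gc (fr ++ q, C) u).2
        from rfl]
    rw [pvShiftLA, List.append_assoc]
    rw [ih f (q ++ (pvLA Gc ([], C) u).1) (pvLA Gc ([], C) u).2]
    rw [show (u :: fr).foldl (pvLA Gc) (q, C) = fr.foldl (pvLA Gc) (pvLA Gc (q, C) u) from rfl,
        pvShiftLA Gc u q C]

-- core per-node relational lemma -------------------------------------------

lemma pvNode (row : List Int) (u d : Int) (hd : 0 ≤ d) (vs : List Int) :
    ∀ (q C dist : List Int),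
      C = dist.map pvPc →
      0 ≤ u → u < (dist.length : Int) → PySem.List.pyGetD dist u 0 = d →
      (∀ v ∈ vs, 0 ≤ v ∧ v < (dist.length : Int)) →
      (vs.foldl (pvNAg row u) (q, C)).1 = (vs.foldl (pvNB row (d + 1)) (q, dist)).1
      ∧ (vs.foldl (pvNAg row u) (q, C)).2 = ((vs.foldl (pvNB row (d + 1)) (q, dist)).2).map pvPc
      ∧ ((vs.foldl (pvNB row (d + 1)) (q, dist)).2).length = dist.length
      ∧ (∀ i : Int, 0 ≤ i → 0 ≤ PySem.List.pyGetD dist i 0 →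
           PySem.List.pyGetD ((vs.foldl (pvNB row (d + 1)) (q, dist)).2) i 0
             = PySem.List.pyGetD dist i 0)
      ∧ (∀ x, x ∈ (vs.foldl (pvNB row (d + 1)) (q, dist)).1 →
           x ∈ q ∨ (0 ≤ x ∧ x < (dist.length : Int)
             ∧ PySem.List.pyGetD ((vs.foldl (pvNB row (d + 1)) (q, dist)).2) x 0 = d + 1))
      ∧ pvNeg ((vs.foldl (pvNB row (d + 1)) (q, dist)).2)
          + ((vs.foldl (pvNB row (d + 1)) (q, dist)).1).length
        = pvNeg dist + q.length := by
  induction vs with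
  | nil =>
    intro q C dist hC _ _ _ _
    exact ⟨rfl, hC, rfl, fun _ _ _ => rfl, fun x hx => Or.inl hx, rfl⟩
  | cons v vs ih =>
    intro q C dist hC hu0 hu1 hud hvs
    obtain ⟨hv0, hv1⟩ := hvs v (List.mem_cons_self ..)
    have hvs' := fun w hw => hvs w (List.mem_cons_of_mem v hw)
    simp only [List.foldl_cons]
    by_cases hg : row.contains v = true
    · -- v is a real neighbor: both bodies are the identity
      have hA : pvNAg row u (q, C) v = (q, C) := by unfold pvNAg; rw [hg]; rfl
      have hB : pvNB row (d + 1) (q, dist) v = (q, dist) := by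
        unfold pvNB; rw [pvContains, hg]; rfl
      rw [hA, hB]
      exact ih q C dist hC hu0 hu1 hud hvs'
    · have hgb : row.contains v = false := by
        rw [Bool.not_eq_true] at hg; exact hg
      have hCv : PySem.List.pyGetD C v 0 = pvPc (PySem.List.pyGetD dist v 0) := by
        rw [hC]; exact pvGetMap dist v hv0 hv1
      by_cases he : PySem.List.pyGetD dist v 0 < 0
      · -- v unreached: both sides color it
        have hCu : PySem.List.pyGetD C u 0 = pvPc d := by
          rw [hC, pvGetMap dist u hu0 hu1, hud]
        have hA : pvNAg row u (q, C) v
            = (q ++ [v], PySem.List.pySetD C v (-(PySem.List.pyGetD C u 0))) := by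
          unfold pvNAg pvNA
          rw [hgb]
          simp only [Bool.not_false, if_pos]
          rw [if_pos (by rw [hCv]; simp [pvPc_eq_zero_iff, he])]
        have hB : pvNB row (d + 1) (q, dist) v
            = (q ++ [v], PySem.List.pySetD dist v (d + 1)) := by
          unfold pvNB
          rw [pvContains, hgb]
          simp [he]
        rw [hA, hB]
        set dist' := PySem.List.pySetD dist v (d + 1) with hdist'
        have hlen' : dist'.length = dist.length := PySem.List.length_pySetD _ _ _
        have hCset : PySem.List.pySetD C v (-(PySem.List.pyGetD C u 0)) = dist'.map pvPc := by
          rw [hCu, ← pvPc_succ d hd, hC, pvSetMap dist v (d + 1) hv0]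
        have hget' : ∀ j : Int, 0 ≤ j → PySem.List.pyGetD dist' j 0
            = if j = v then d + 1 else PySem.List.pyGetD dist j 0 := by
          intro j hj
          exact pvGetSet dist v j (d + 1) 0 hv0 hv1 hj
        have hud' : PySem.List.pyGetD dist' u 0 = d := by
          rw [hget' u hu0, if_neg (by intro h; rw [h] at hud; omega)]
          exact hud
        have ihh := ih (q ++ [v]) (dist'.map pvPc) dist' rfl hu0 (by rw [hlen']; exact hu1)
          hud' (by intro w hw; rw [hlen']; exact hvs' w hw)
        rw [hCset]
        obtain ⟨c1, c2, c3, c4, c5, c6⟩ := ihh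
        refine ⟨c1, c2, by rw [c3, hlen'], ?_, ?_, ?_⟩
        · intro i hi0 hi
          have hiv : i ≠ v := by intro h; rw [h] at hi; omega
          have : PySem.List.pyGetD dist' i 0 = PySem.List.pyGetD dist i 0 := by
            rw [hget' i hi0, if_neg hiv]
          rw [c4 i hi0 (by rw [this]; exact hi), this]
        · intro x hx
          rcases c5 x hx with hxq | ⟨hx0, hx1, hx2⟩
          · rcases List.mem_append.mp hxq with h | h
            · exact Or.inl h
            · have hxv : x = v := by simpa using h
              subst hxv
              refine Or.inr ⟨hv0, hv1, ?_⟩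
              rw [c4 x hv0 (by rw [hget' x hv0, if_pos rfl]; omega),
                  hget' x hv0, if_pos rfl]
          · exact Or.inr ⟨hx0, by rw [← hlen']; exact hx1, hx2⟩
        · have hneg' : pvNeg dist' + 1 = pvNeg dist := pvNegSet dist v (d + 1) hv0 hv1 he (by omega)
          rw [c6]
          simp only [List.length_append, List.length_cons, List.length_nil]
          omega
      · -- v already reached: both bodies are the identity
        have hA : pvNAg row u (q, C) v = (q, C) := by
          unfold pvNAg pvNA
          rw [hgb]
          simp only [Bool.not_false, if_pos]
          rw [if_neg (by rw [hCv]; simp [pvPc_eq_zero_iff, he])]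
        have hB : pvNB row (d + 1) (q, dist) v = (q, dist) := by
          unfold pvNB
          rw [pvContains, hgb]
          simp [he]
        rw [hA, hB]
        exact ih q C dist hC hu0 hu1 hud hvs'

-- per-level relational lemma -------------------------------------------------

lemma pvLevel (G : List (List Int)) (d : Int) (hd : 0 ≤ d) (front : List Int) :
    ∀ (q C dist : List Int),
      C = dist.map pvPc → dist.length = G.length →
      (∀ u ∈ front, 0 ≤ u ∧ u < (dist.length : Int) ∧ PySem.List.pyGetD dist u 0 = d) →
      (front.foldl (pvLA ((PySem.List.pyRange 0 (PySem.List.len G) 1).map (pvFrow G))) (q, C)).1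
        = (front.foldl (pvLB G (PySem.List.len G) (d + 1)) (q, dist)).1
      ∧ (front.foldl (pvLA ((PySem.List.pyRange 0 (PySem.List.len G) 1).map (pvFrow G))) (q, C)).2
        = ((front.foldl (pvLB G (PySem.List.len G) (d + 1)) (q, dist)).2).map pvPc
      ∧ ((front.foldl (pvLB G (PySem.List.len G) (d + 1)) (q, dist)).2).length = dist.length
      ∧ (∀ i : Int, 0 ≤ i → 0 ≤ PySem.List.pyGetD dist i 0 →
           PySem.List.pyGetD ((front.foldl (pvLB G (PySem.List.len G) (d + 1)) (q, dist)).2) i 0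
             = PySem.List.pyGetD dist i 0)
      ∧ (∀ x, x ∈ (front.foldl (pvLB G (PySem.List.len G) (d + 1)) (q, dist)).1 →
           x ∈ q ∨ (0 ≤ x ∧ x < (dist.length : Int)
             ∧ PySem.List.pyGetD ((front.foldl (pvLB G (PySem.List.len G) (d + 1)) (q, dist)).2) x 0
                 = d + 1))
      ∧ pvNeg ((front.foldl (pvLB G (PySem.List.len G) (d + 1)) (q, dist)).2)
          + ((front.foldl (pvLB G (PySem.List.len G) (d + 1)) (q, dist)).1).length
        = pvNeg dist + q.length := by
  induction front with
  | nil =>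
    intro q C dist hC _ _
    exact ⟨rfl, hC, rfl, fun _ _ _ => rfl, fun x hx => Or.inl hx, rfl⟩
  | cons u fr ih =>
    intro q C dist hC hlen hfr
    obtain ⟨hu0, hu1, hud⟩ := hfr u (List.mem_cons_self ..)
    have hfr' := fun w hw => hfr w (List.mem_cons_of_mem u hw)
    have hulen : u < PySem.List.len G := by
      rw [PySem.List.len_eq]; rw [hlen] at hu1; exact_mod_cast hu1
    simp only [List.foldl_cons]
    have hstepA : pvLA ((PySem.List.pyRange 0 (PySem.List.len G) 1).map (pvFrow G)) (q, C) u
        = (PySem.List.pyRange 0 (PySem.List.len G) 1).foldl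
            (pvNAg (PySem.List.pyGetD G u []) u) (q, C) := by
      unfold pvLA
      rw [PySem.List.pyGetD_map_pyRange_of_nonneg (pvFrow G) _ u [] hu0 hulen]
      unfold pvFrow
      rw [List.foldl_filter]
      rfl
    have hstepB : pvLB G (PySem.List.len G) (d + 1) (q, dist) u
        = (PySem.List.pyRange 0 (PySem.List.len G) 1).foldl
            (pvNB (PySem.List.pyGetD G u []) (d + 1)) (q, dist) := rfl
    rw [hstepA, hstepB]
    have hmem : ∀ v ∈ PySem.List.pyRange 0 (PySem.List.len G) 1,
        0 ≤ v ∧ v < (dist.length : Int) := by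
      intro v hv
      have hb := PySem.List.mem_pyRange_one.mp hv
      refine ⟨hb.1, ?_⟩
      rw [PySem.List.len_eq] at hb
      rw [hlen]
      exact_mod_cast hb.2
    obtain ⟨n1, n2, n3, n4, n5, n6⟩ :=
      pvNode (PySem.List.pyGetD G u []) u d hd (PySem.List.pyRange 0 (PySem.List.len G) 1)
        q C dist hC hu0 hu1 hud hmem
    set B1 := (PySem.List.pyRange 0 (PySem.List.len G) 1).foldl
        (pvNB (PySem.List.pyGetD G u []) (d + 1)) (q, dist) with hB1
    obtain ⟨c1, c2, c3, c4, c5, c6⟩ := ih B1.1 (B1.2.map pvPc) B1.2 rfl (by rw [n3]; exact hlen)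
      (by
        intro w hw
        obtain ⟨hw0, hw1, hwd⟩ := hfr' w hw
        refine ⟨hw0, by rw [n3]; exact hw1, ?_⟩
        rw [n4 w hw0 (by rw [hwd]; exact hd), hwd])
    rw [show (PySem.List.pyRange 0 (PySem.List.len G) 1).foldl
          (pvNAg (PySem.List.pyGetD G u []) u) (q, C) = (B1.1, B1.2.map pvPc) by
        rw [← n1, ← n2]]
    refine ⟨c1, c2, by rw [c3, n3], ?_, ?_, ?_⟩
    · intro i hi0 hi
      have h1 : PySem.List.pyGetD B1.2 i 0 = PySem.List.pyGetD dist i 0 := n4 i hi0 hi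
      rw [c4 i hi0 (by rw [h1]; exact hi), h1]
    · intro x hx
      rcases c5 x hx with hxq | ⟨hx0, hx1, hx2⟩
      · rcases n5 x hxq with hxin | ⟨hx0, hx1, hx2⟩
        · exact Or.inl hxin
        · refine Or.inr ⟨hx0, hx1, ?_⟩
          rw [c4 x hx0 (by rw [hx2]; omega), hx2]
      · exact Or.inr ⟨hx0, by rw [← n3]; exact hx1, hx2⟩
    · rw [c6]; omega

-- main lemma: A's queue BFS over the complement = pvPc of B's level BFS ------

lemma pvQueueNil (Gc : List (List Int)) (front : List Int) (f : Nat) (C : List Int) :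
    bfsLoopA (front.length + f) Gc front C
      = bfsLoopA f Gc ((front.foldl (pvLA Gc) ([], C)).1) ((front.foldl (pvLA Gc) ([], C)).2) := by
  have h := pvQueue Gc front f [] C
  rwa [List.append_nil] at h

lemma pvMain (k : Nat) :
    ∀ (G : List (List Int)) (front : List Int) (d : Int) (C dist : List Int) (f1 f2 : Nat),
      0 ≤ d → C = dist.map pvPc → dist.length = G.length →
      (∀ u ∈ front, 0 ≤ u ∧ u < (dist.length : Int) ∧ PySem.List.pyGetD dist u 0 = d) →
      pvNeg dist ≤ k → front.length + pvNeg dist ≤ f1 → pvNeg dist + 1 ≤ f2 →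
      bfsLoopA f1 ((PySem.List.pyRange 0 (PySem.List.len G) 1).map (pvFrow G)) front C
        = (bfsLevelB f2 G (PySem.List.len G) front d dist).map pvPc := by
  induction k with
  | zero =>
    intro G front d C dist f1 f2 hd hC hlen hfr hk hf1 hf2
    cases front with
    | nil => rw [bfsLoopA_nil, bfsLevelB_nil, hC]
    | cons u fr =>
      obtain ⟨l1, l2, l3, l4, l5, l6⟩ := pvLevel G d hd (u :: fr) [] C dist hC hlen hfr
      cases f2 with
      | zero => omega
      | succ f2' =>
        have hf1e : f1 = (u :: fr).length + (f1 - (u :: fr).length) := by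
          simp only [List.length_cons] at hf1 ⊢; omega
        rw [hf1e, pvQueueNil, bfsLevelB_cons, l1, l2]
        have hempty : ((u :: fr).foldl (pvLB G (PySem.List.len G) (d + 1)) ([], dist)).1 = [] := by
          have : pvNeg dist = 0 := by omega
          rw [List.eq_nil_iff_length_eq_zero]
          simp only [List.length_nil] at l6
          omega
        rw [hempty, bfsLoopA_nil, bfsLevelB_nil]
  | succ k ih =>
    intro G front d C dist f1 f2 hd hC hlen hfr hk hf1 hf2
    cases front with
    | nil => rw [bfsLoopA_nil, bfsLevelB_nil, hC]
    | cons u fr =>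
      obtain ⟨l1, l2, l3, l4, l5, l6⟩ := pvLevel G d hd (u :: fr) [] C dist hC hlen hfr
      cases f2 with
      | zero => omega
      | succ f2' =>
        have hf1e : f1 = (u :: fr).length + (f1 - (u :: fr).length) := by
          simp only [List.length_cons] at hf1 ⊢; omega
        rw [hf1e, pvQueueNil, bfsLevelB_cons, l1, l2]
        set SB := (u :: fr).foldl (pvLB G (PySem.List.len G) (d + 1)) ([], dist) with hSB
        by_cases hemp : SB.1 = []
        · rw [hemp, bfsLoopA_nil, bfsLevelB_nil]
        · have hpos : 1 ≤ SB.1.length := by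
            rcases List.exists_cons_of_ne_nil hemp with ⟨y, ys, hys⟩
            rw [hys]; simp
          have hbal : pvNeg SB.2 + SB.1.length = pvNeg dist := by simpa using l6
          have hlc : (u :: fr).length = fr.length + 1 := by simp
          have hk' : pvNeg SB.2 ≤ k := by omega
          have hfa : SB.1.length + pvNeg SB.2 ≤ f1 - (u :: fr).length := by omega
          have hfb : pvNeg SB.2 + 1 ≤ f2' := by omega
          exact ih G SB.1 (d + 1) (SB.2.map pvPc) SB.2 (f1 - (u :: fr).length) f2'
            (by omega) rfl (by rw [l3]; exact hlen)
            (by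
              intro w hw
              rcases l5 w hw with hin | ⟨hw0, hw1, hw2⟩
              · simp at hin
              · exact ⟨hw0, by rw [l3]; exact hw1, hw2⟩)
            hk' hfa hfb

lemma pvLenFoldB (row : List Int) (d1 : Int) (vs : List Int) :
    ∀ (s : List Int × List Int), ((vs.foldl (pvNB row d1) s).2).length = s.2.length := by
  induction vs with
  | nil => intro s; rfl
  | cons v vs ih =>
    intro s
    simp only [List.foldl_cons]
    rw [ih]
    unfold pvNB
    by_cases h : (!((PySem.Set.ofList row).contains v) && decide (PySem.List.pyGetD s.2 v 0 < 0)) = true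
    · rw [if_pos h]; exact PySem.List.length_pySetD _ _ _
    · rw [if_neg h]

lemma pvLenLB (G : List (List Int)) (n d1 : Int) (front : List Int) :
    ∀ (s : List Int × List Int), ((front.foldl (pvLB G n d1) s).2).length = s.2.length := by
  induction front with
  | nil => intro s; rfl
  | cons u fr ih =>
    intro s
    simp only [List.foldl_cons]
    rw [ih]
    exact pvLenFoldB _ _ _ s

lemma pvLenB (fuel : Nat) :
    ∀ (G : List (List Int)) (n : Int) (front : List Int) (d : Int) (dist : List Int),
      (bfsLevelB fuel G n front d dist).length = dist.length := by
  induction fuel with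
  | zero => intro G n front d dist; rfl
  | succ fuel ih =>
    intro G n front d dist
    cases front with
    | nil => rfl
    | cons u fr =>
      rw [bfsLevelB_cons, ih]
      exact pvLenLB _ _ _ _ _

-- A's final split loop builds the two filters ---------------------------------

lemma pvSplit (Col : List Int) (vs : List Int) :
    ∀ (a b : List Int),
      vs.foldl (fun (cs : List Int × List Int) u =>
        if PySem.List.pyGetD Col u 0 == 0 then (cs.1 ++ [u], cs.2 ++ [u])
        else if PySem.List.pyGetD Col u 0 == 1 then (cs.1 ++ [u], cs.2)
        else (cs.1, cs.2 ++ [u])) (a, b)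
      = (a ++ vs.filter (fun u => (PySem.List.pyGetD Col u 0 == 0) || (PySem.List.pyGetD Col u 0 == 1)),
         b ++ vs.filter (fun u => (PySem.List.pyGetD Col u 0 == 0) || !(PySem.List.pyGetD Col u 0 == 1))) := by
  induction vs with
  | nil => intro a b; simp
  | cons v vs ih =>
    intro a b
    simp only [List.foldl_cons, List.filter_cons]
    by_cases h0 : PySem.List.pyGetD Col v 0 == 0
    · rw [if_pos h0, ih]
      simp [h0]
    · rw [if_neg h0]
      by_cases h1 : PySem.List.pyGetD Col v 0 == 1
      · rw [if_pos h1, ih]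
        simp [h0, h1]
      · rw [if_neg h1, ih]
        simp [h0, h1]

-- ===== VERDICT (by name: the statement is the Claim_ definition above) =====
theorem clique_spec : Claim_equal_clique := by
  intro G _ hpre
  unfold Spec_clique clique clique_alt bipartiteA
  dsimp only
  rw [pvCompletion_eq]
  have hlen : PySem.List.len ((PySem.List.pyRange 0 (PySem.List.len G) 1).map
      (fun u => pvFrow G u)) = PySem.List.len G := by
    simp [PySem.List.len_eq, PySem.List.length_pyRange_one]
  have hlen2 : ((PySem.List.pyRange 0 (PySem.List.len G) 1).map
      (fun u => pvFrow G u)).length = G.length := by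
    simp [PySem.List.length_pyRange_one, PySem.List.len_eq]
  rw [hlen, hlen2]
  have hn : 0 < G.length := List.length_pos_of_ne_nil hpre
  have hn' : (0 : Int) < PySem.List.len G := by
    rw [PySem.List.len_eq]; exact_mod_cast hn
  set dist0 : List Int :=
    PySem.List.pySetD ((PySem.List.pyRange 0 (PySem.List.len G) 1).map (fun _ => (-1 : Int))) 0 0
    with hdist0
  have hdlen : dist0.length = G.length := by
    rw [hdist0, PySem.List.length_pySetD, List.length_map, PySem.List.length_pyRange_one,
        PySem.List.len_eq]
    omega
  have hmm : ((PySem.List.pyRange 0 (PySem.List.len G) 1).map (fun _ => (-1 : Int))).map pvPc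
      = (PySem.List.pyRange 0 (PySem.List.len G) 1).map (fun _ => (0 : Int)) := by
    rw [List.map_map]
    apply List.map_congr_left
    intro x _
    show pvPc (-1) = 0
    decide
  have hC0 : PySem.List.pySetD ((PySem.List.pyRange 0 (PySem.List.len G) 1).map
      (fun _ => (0 : Int))) 0 1 = dist0.map pvPc := by
    rw [hdist0, ← pvSetMap _ 0 0 le_rfl, hmm, show pvPc 0 = (1 : Int) from by decide]
  have hget0 : PySem.List.pyGetD dist0 0 0 = 0 := by
    have hl : (0 : Int) < ((((PySem.List.pyRange 0 (PySem.List.len G) 1).map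
        (fun _ => (-1 : Int))).length : Nat) : Int) := by
      rw [List.length_map, PySem.List.length_pyRange_one, PySem.List.len_eq]
      omega
    rw [hdist0, pvGetSet _ 0 0 0 0 le_rfl hl le_rfl]
    simp
  have hnegle : pvNeg dist0 ≤ G.length := by
    have := List.length_filter_le (fun e => decide (e < 0)) dist0
    unfold pvNeg
    omega
  have hmain := pvMain (pvNeg dist0) G [0] 0
    (PySem.List.pySetD ((PySem.List.pyRange 0 (PySem.List.len G) 1).map (fun _ => (0 : Int))) 0 1)
    dist0 (G.length + 1) (G.length + 1)
    le_rfl hC0 hdlen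
    (by
      intro u hu
      have hu0 : u = 0 := by simpa using hu
      subst hu0
      exact ⟨le_rfl, by rw [hdlen]; exact_mod_cast hn, hget0⟩)
    le_rfl (by simp; omega) (by omega)
  rw [hmain]
  set distF := bfsLevelB (G.length + 1) G (PySem.List.len G) [0] 0 dist0 with hdistF
  have hflen : distF.length = G.length := by
    rw [hdistF, pvLenB, hdlen]
  rw [pvSplit]
  have hpt : ∀ u ∈ PySem.List.pyRange 0 (PySem.List.len G) 1,
      PySem.List.pyGetD (distF.map pvPc) u 0 = pvPc (PySem.List.pyGetD distF u 0) := by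
    intro u hu
    have hb := PySem.List.mem_pyRange_one.mp hu
    rw [PySem.List.len_eq] at hb
    exact pvGetMap distF u hb.1 (by rw [hflen]; exact_mod_cast hb.2)
  refine Prod.ext ?_ ?_
  · show ([] : List Int) ++ _ = _
    rw [List.nil_append]
    apply List.filter_congr
    intro u hu
    rw [hpt u hu]
    exact pvPred1 (PySem.List.pyGetD distF u 0)
  · show ([] : List Int) ++ _ = _
    rw [List.nil_append]
    apply List.filter_congr
    intro u hu
    rw [hpt u hu]
    exact pvPred2 (PySem.List.pyGetD distF u 0)
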